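-- pv_equiv track=rewrite | github.com/SujitKumarDatta2002/Academic_CSE | CSE221/Spring 2024/Lab Assignments of Spring2024/Lab 07/task2.py | findingCost
-- ===== SOURCE A (Python) =====
-- def findParent(parent, n):
--     if parent[n] == n:
--         return n
--     else:
--         return findParent(parent, parent[n])
--
-- def findingCost(parent, edge, i, j):
--     pi = findParent(parent, i)
--     pj = findParent(parent, j)
--
--     if pi != pj:
--         ci = 0
--         cj = 0
--         for k in parent.values():
--             if k == pi:
--                 ci += 1
--             elif k == pj:
--                 cj += 1
--         if ci < cj:
--                 parent[i] = pj
--         else: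
--                 parent[j] = pi
--         return edge
--     return 0
-- ===== SOURCE B (Python) =====
-- def findingCost(parent, edge, i, j):
--     # Roots found by applying the parent map len(parent) times (fixed point is
--     # reached within that many steps on any terminating chain); counts taken
--     # with list.count; same in-place union mutation of parent as A.
--     n = len(parent)
--     x = i
--     for _ in range(n):
--         x = parent[x]
--     y = j
--     for _ in range(n):
--         y = parent[y]
--     if x == y:
--         return 0
--     vals = list(parent.values())
--     if vals.count(x) < vals.count(y):
--         parent[i] = y
--     else:
--         parent[j] = x
--     return edge
-- ===== Notes on version B (the rewrite author's own statement) =====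
-- stated objective: alternative
-- what changed: Root finding is rewritten from A's recursive findParent to a bounded for-loop that applies the parent map len(parent) times (the fixed point is reached within that bound on any terminating chain), the two-accumulator if/elif scan is replaced by two list.count calls on the values list, and the control flow is inverted to an early 'return 0' on equal roots; the in-place union mutation of parent is identical.
import Mathlib
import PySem

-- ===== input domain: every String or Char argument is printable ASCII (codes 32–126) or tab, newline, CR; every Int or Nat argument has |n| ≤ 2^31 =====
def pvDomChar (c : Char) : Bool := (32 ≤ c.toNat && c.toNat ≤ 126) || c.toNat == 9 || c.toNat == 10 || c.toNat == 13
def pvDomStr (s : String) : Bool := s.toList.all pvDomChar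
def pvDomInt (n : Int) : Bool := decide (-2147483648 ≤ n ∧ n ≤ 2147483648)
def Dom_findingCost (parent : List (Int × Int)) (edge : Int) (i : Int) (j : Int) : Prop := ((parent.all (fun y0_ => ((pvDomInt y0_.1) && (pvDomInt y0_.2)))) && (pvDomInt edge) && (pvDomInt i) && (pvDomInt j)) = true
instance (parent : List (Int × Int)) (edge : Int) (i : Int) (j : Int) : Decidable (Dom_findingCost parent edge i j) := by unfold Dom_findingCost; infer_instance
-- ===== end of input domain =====

-- B replaces A's recursive findParent by a bounded iteration of the parent map (parent.length
-- applications) and A's two-accumulator if/elif scan by two list.count calls, with an early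
-- 'return 0' on equal roots; the Python B performs the same in-place union mutation of parent
-- as A (the equivalence proved here is about the return value).

-- ===== PORT A =====
-- findParent(parent, n): recursion; fuel parent.length+1 suffices on every input admitted by
-- Pre_ (the chain reaches a fixed point within parent.length steps); where Python would raise
-- (missing key / infinite recursion, both outside Pre_) the port returns the current node.
def pvFindParentA (parent : PySem.Dict Int Int) (n : Int) : Nat → Int
  | 0 => n
  | fuel + 1 =>
    match parent.get? n with
    | none => n
    | some v => if v = n then n else pvFindParentA parent v fuel

def findingCost (parent : List (Int × Int)) (edge : Int) (i : Int) (j : Int) : Int :=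
  let d := PySem.Dict.mk parent
  let pi_ := pvFindParentA d i (parent.length + 1)
  let pj_ := pvFindParentA d j (parent.length + 1)
  if pi_ ≠ pj_ then
    -- ci/cj loop over parent.values() with if/elif
    let cc := d.values.foldl (fun (c : Int × Int) k =>
        if k = pi_ then (c.1 + 1, c.2) else if k = pj_ then (c.1, c.2 + 1) else c) (0, 0)
    -- Python mutates parent here (parent[i] = pj or parent[j] = pi); the return value is unaffected
    let _mutated := if cc.1 < cc.2 then d.insert i pj_ else d.insert j pi_
    edge
  else 0

-- ===== PORT B =====
-- one step 'x = parent[x]'; where Python raises KeyError (missing key, outside Pre_) it keeps x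
def pvStepB (d : PySem.Dict Int Int) (x : Int) : Int := (d.get? x).getD x

def findingCost_alt (parent : List (Int × Int)) (edge : Int) (i : Int) (j : Int) : Int :=
  let d := PySem.Dict.mk parent
  -- for _ in range(len(parent)): x = parent[x]
  let x := (pvStepB d)^[parent.length] i
  let y := (pvStepB d)^[parent.length] j
  if x = y then 0
  else
    let vals := d.values
    -- Python mutates parent here (parent[i] = y or parent[j] = x); the return value is unaffected
    let _mutated := if vals.count x < vals.count y then d.insert i y else d.insert j x
    edge

-- ===== PRECONDITION & SPEC =====
-- one reverse step of the parent map: add every key whose parent is already in S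
def pvGrow (parent : List (Int × Int)) (S : List Int) : List Int :=
  S ++ (parent.filter (fun p => decide (p.2 ∈ S) && !decide (p.1 ∈ S))).map Prod.fst

-- the well-founded part of the parent map: the closure of its fixed points under pvGrow
-- (parent.length reverse steps reach every key whose parent chain terminates)
def pvGood (parent : List (Int × Int)) : List Int :=
  (pvGrow parent)^[parent.length] ((parent.filter (fun p => p.2 == p.1)).map Prod.fst)

-- Pre_ excludes exactly the inputs on which A raises: i or j outside the well-founded part of
-- parent means findParent hits a missing key (KeyError) or a cycle (RecursionError); duplicate
-- keys cannot occur in a Python dict and are excluded so that first-match lookup is the dict's.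
def Pre_findingCost (parent : List (Int × Int)) (edge : Int) (i : Int) (j : Int) : Prop :=
  (parent.map Prod.fst).Nodup ∧ i ∈ pvGood parent ∧ j ∈ pvGood parent
instance (parent : List (Int × Int)) (edge : Int) (i : Int) (j : Int) : Decidable (Pre_findingCost parent edge i j) := by unfold Pre_findingCost; infer_instance

def pvWitness_findingCost : (List (Int × Int)) × Int × Int × Int := ([(1, 1), (2, 1), (3, 3)], 7, 2, 3)

def Spec_findingCost (parent : List (Int × Int)) (edge : Int) (i : Int) (j : Int) (out : Int) : Prop := out = findingCost_alt parent edge i j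
instance (parent : List (Int × Int)) (edge : Int) (i : Int) (j : Int) (out : Int) : Decidable (Spec_findingCost parent edge i j out) := by unfold Spec_findingCost; infer_instance

-- ===== CLAIM (what is proved, stated in full; the proofs are below) =====
def Claim_equal_findingCost : Prop := ∀ (parent : List (Int × Int)) (edge : Int) (i : Int) (j : Int), Dom_findingCost parent edge i j → Pre_findingCost parent edge i j → Spec_findingCost parent edge i j (findingCost parent edge i j)

-- ===== LEMMAS AND PROOFS =====
-- A's fueled recursion agrees with B's bounded iteration as soon as some iterate within the
-- fuel bound is a fixed point of the parent map.
theorem pvChaseA_eq_iterate (d : PySem.Dict Int Int) (L : Nat) (n : Int)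
    (h : ∃ k ≤ L, d.get? ((pvStepB d)^[k] n) = some ((pvStepB d)^[k] n)) :
    pvFindParentA d n (L + 1) = (pvStepB d)^[L] n := by
  induction L generalizing n with
  | zero =>
    obtain ⟨k, hk, hroot⟩ := h
    interval_cases k
    simp only [Function.iterate_zero, id_eq] at hroot
    simp [pvFindParentA, hroot]
  | succ L ih =>
    simp only [pvFindParentA]
    cases hg : d.get? n with
    | none =>
      have hfix : pvStepB d n = n := by simp [pvStepB, hg]
      simp [Function.iterate_fixed hfix]
    | some v =>
      by_cases hv : v = n
      · subst hv
        have hfix : pvStepB d v = v := by simp [pvStepB, hg]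
        simp [Function.iterate_fixed hfix]
      · have hstep : pvStepB d n = v := by simp [pvStepB, hg]
        have h' : ∃ k ≤ L, d.get? ((pvStepB d)^[k] v) = some ((pvStepB d)^[k] v) := by
          obtain ⟨k, hk, hroot⟩ := h
          cases k with
          | zero =>
            simp only [Function.iterate_zero, id_eq] at hroot
            rw [hg] at hroot
            exact absurd (Option.some_injective _ hroot) hv
          | succ k =>
            refine ⟨k, Nat.le_of_succ_le_succ hk, ?_⟩
            rwa [Function.iterate_succ_apply, hstep] at hroot
        show (if v = n then n else pvFindParentA d v (L + 1)) = (pvStepB d)^[L + 1] n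
        rw [if_neg hv, Function.iterate_succ_apply, hstep]
        exact ih v h'

-- every member of the m-fold pvGrow closure of the fixed points reaches a fixed point of the
-- dict's lookup within m iterated steps
theorem pvGood_reaches (parent : List (Int × Int)) (hnd : (parent.map Prod.fst).Nodup)
    (m : Nat) (n : Int)
    (hn : n ∈ (pvGrow parent)^[m] ((parent.filter (fun p => p.2 == p.1)).map Prod.fst)) :
    ∃ k ≤ m, (PySem.Dict.mk parent).get? ((pvStepB (PySem.Dict.mk parent))^[k] n)
        = some ((pvStepB (PySem.Dict.mk parent))^[k] n) := by
  induction m generalizing n with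
  | zero =>
    simp only [Function.iterate_zero, id_eq, List.mem_map, List.mem_filter] at hn
    obtain ⟨p, ⟨hp, hself⟩, hfst⟩ := hn
    have hself' : p.2 = p.1 := by simpa using hself
    refine ⟨0, le_refl 0, ?_⟩
    simp only [Function.iterate_zero, id_eq]
    have : (n, n) ∈ (PySem.Dict.mk parent).items := by
      have : p = (n, n) := by
        obtain ⟨a, b⟩ := p
        simp_all
      simpa [PySem.Dict.items] using this ▸ hp
    exact PySem.Dict.get?_of_mem_items _ this (by simpa [PySem.Dict.keys, PySem.Dict.items] using hnd)
  | succ m ih =>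
    rw [Function.iterate_succ_apply'] at hn
    simp only [pvGrow, List.mem_append] at hn
    cases hn with
    | inl hS =>
      obtain ⟨k, hk, hroot⟩ := ih n hS
      exact ⟨k, Nat.le_succ_of_le hk, hroot⟩
    | inr hnew =>
      simp only [List.mem_map, List.mem_filter] at hnew
      obtain ⟨p, ⟨hp, hcond⟩, hfst⟩ := hnew
      have hmemS : p.2 ∈ (pvGrow parent)^[m] ((parent.filter (fun p => p.2 == p.1)).map Prod.fst) := by
        simp only [Bool.and_eq_true, decide_eq_true_eq] at hcond
        exact hcond.1
      have hget : (PySem.Dict.mk parent).get? n = some p.2 := by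
        have : (n, p.2) ∈ (PySem.Dict.mk parent).items := by
          simpa [PySem.Dict.items] using hfst ▸ (show (p.1, p.2) ∈ parent from hp)
        exact PySem.Dict.get?_of_mem_items _ this (by simpa [PySem.Dict.keys, PySem.Dict.items] using hnd)
      have hstep : pvStepB (PySem.Dict.mk parent) n = p.2 := by simp [pvStepB, hget]
      obtain ⟨k, hk, hroot⟩ := ih p.2 hmemS
      refine ⟨k + 1, Nat.succ_le_succ hk, ?_⟩
      rwa [Function.iterate_succ_apply, hstep]

theorem findingCost_eq_alt (parent : List (Int × Int)) (edge : Int) (i : Int) (j : Int)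
    (hpre : Pre_findingCost parent edge i j) :
    findingCost parent edge i j = findingCost_alt parent edge i j := by
  obtain ⟨hnd, hi, hj⟩ := hpre
  have hri := pvChaseA_eq_iterate (PySem.Dict.mk parent) parent.length i
    (pvGood_reaches parent hnd parent.length i hi)
  have hrj := pvChaseA_eq_iterate (PySem.Dict.mk parent) parent.length j
    (pvGood_reaches parent hnd parent.length j hj)
  simp only [findingCost, findingCost_alt, hri, hrj]
  by_cases h :
      (pvStepB (PySem.Dict.mk parent))^[parent.length] i =
        (pvStepB (PySem.Dict.mk parent))^[parent.length] j
  · simp [h]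
  · simp [h]

-- ===== VERDICT (by name: the statement is the Claim_ definition above) =====
theorem findingCost_spec : Claim_equal_findingCost := by
  intro parent edge i j _ hpre
  exact findingCost_eq_alt parent edge i j hpre
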